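-- pv_equiv track=rewrite | github.com/HomelessChicken78/ITS-Esercizi | Python 1-4/Recupero_e_Potenziamento/part_3/ex_05/ReP3_C_Coccia.py | pariUguali
-- ===== SOURCE A (Python) =====
-- def listaPositiva(lst: list[int]) -> bool:
--     '''Ritorna True se tutti i numeri nella lista sono positivi o 0'''
--     for element in lst:
--         if element < 0:
--             return False
--     return True
--
-- def pariUguali(a: list[int], b: list[int]) -> list[int]:
--     '''Questo metodo riceve in input due liste a e b di interi positivi e deve
--     estituire una lista c.
--
--     Ogni elementi della lista c deve essere uguale a:
--     - 1 se l'elemento i-esimo di a e l'elemento i-esimo di b sono sono entrambi pari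
--     - 0 altrimenti'''
--     if not (listaPositiva(a) and listaPositiva(b)):
--         raise ValueError("Le liste devono avere valori positivi!")
--
--     # Find the longest list
--     if len(a) >= len(b):
--         longest_list: list[int] = a
--         shortest_list: list[int] = b
--     else:
--         longest_list: list[int] = b
--         shortest_list: list[int] = a
--
--     c: list[int] = []
--     index: int = 0
--
--     while index < len(shortest_list):
--         if shortest_list[index] % 2 == 0 and longest_list[index] % 2 == 0:
--             c.append(1)
--         else:
--             c.append(0)
--         index += 1
--
--     for i in range(0, ((len(longest_list)-1)-index)+1):
--         c.append(0)
--
--     return c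
-- ===== SOURCE B (Python) =====
-- from itertools import zip_longest
--
-- def pariUguali(a: list[int], b: list[int]) -> list[int]:
--     if any(x < 0 for x in a) or any(x < 0 for x in b):
--         raise ValueError("Le liste devono avere valori positivi!")
--     # fillvalue=1 is odd, so every padded position yields 0
--     return [1 if x % 2 == 0 and y % 2 == 0 else 0
--             for x, y in zip_longest(a, b, fillvalue=1)]
-- ===== Notes on version B (the rewrite author's own statement) =====
-- stated objective: simpler
-- what changed: Replaced the longest/shortest selection, index-based while loop and separate zero-padding loop by a single pass over zip_longest(a, b, fillvalue=1): the odd fill value makes every padded position evaluate to 0, so both the length comparison and the padding loop disappear.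
import Mathlib
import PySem

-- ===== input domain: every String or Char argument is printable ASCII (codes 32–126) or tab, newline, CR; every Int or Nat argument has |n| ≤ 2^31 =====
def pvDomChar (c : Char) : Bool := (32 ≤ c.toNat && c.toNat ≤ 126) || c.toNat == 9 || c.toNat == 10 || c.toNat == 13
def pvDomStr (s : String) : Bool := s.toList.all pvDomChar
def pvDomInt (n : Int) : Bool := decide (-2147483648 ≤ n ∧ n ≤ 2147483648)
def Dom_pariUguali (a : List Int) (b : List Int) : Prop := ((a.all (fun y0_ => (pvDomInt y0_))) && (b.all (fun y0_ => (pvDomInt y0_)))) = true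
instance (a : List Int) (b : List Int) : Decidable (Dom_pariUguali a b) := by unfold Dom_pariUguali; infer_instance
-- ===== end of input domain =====

-- B replaces A's longest/shortest selection, index-based while loop and separate
-- zero-padding loop by a single pass over a zip-longest with odd fill value 1 (simpler).

-- ===== PORT A =====
-- helper listaPositiva: early-return loop
def listaPositiva : List Int → Bool
  | [] => true
  | element :: rest => if element < 0 then false else listaPositiva rest

-- the while loop: index over shortest, appending 1/0 to c
def pariUguali.whileLoop (shortest longest : List Int) (index : Nat) (c : List Int) : List Int :=
  if _h : index < shortest.length then
    let e : Int :=
      if PySem.List.pyGetD shortest (index : Int) 0 % 2 == 0 &&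
         PySem.List.pyGetD longest (index : Int) 0 % 2 == 0 then 1 else 0
    pariUguali.whileLoop shortest longest (index + 1) (c ++ [e])
  else c
termination_by shortest.length - index

def pariUguali (a : List Int) (b : List Int) : List Int :=
  if !(listaPositiva a && listaPositiva b) then []  -- raise ValueError (excluded by Pre_)
  else
    -- the longest/shortest assignment (the comparison is A's 'if len(a) >= len(b)')
    let longest := if a.length ≥ b.length then a else b
    let shortest := if a.length ≥ b.length then b else a
    let c := pariUguali.whileLoop shortest longest 0 []
    -- for i in range(0, ((len(longest)-1)-index)+1): c.append(0)   (index = len(shortest))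
    (PySem.List.pyRange 0 (((longest.length : Int) - 1 - shortest.length) + 1) 1).foldl
      (fun c _ => c ++ [(0 : Int)]) c

-- ===== PORT B =====
-- itertools.zip_longest(a, b, fillvalue=1), ported by hand (exact: pads the shorter list with 1)
def zipLongest1 : List Int → List Int → List (Int × Int)
  | [], [] => []
  | x :: xs, [] => (x, 1) :: zipLongest1 xs []
  | [], y :: ys => (1, y) :: zipLongest1 [] ys
  | x :: xs, y :: ys => (x, y) :: zipLongest1 xs ys

def pariUguali_alt (a : List Int) (b : List Int) : List Int :=
  if a.any (fun x => x < 0) || b.any (fun x => x < 0) then []  -- raise ValueError (excluded by Pre_)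
  else (zipLongest1 a b).map (fun xy => if xy.1 % 2 == 0 && xy.2 % 2 == 0 then (1 : Int) else 0)

-- ===== PRECONDITION & SPEC =====
-- A raises ValueError when either list contains a negative number; those inputs are excluded.
def Pre_pariUguali (a : List Int) (b : List Int) : Prop :=
  (∀ x ∈ a, 0 ≤ x) ∧ (∀ x ∈ b, 0 ≤ x)
instance (a : List Int) (b : List Int) : Decidable (Pre_pariUguali a b) := by
  unfold Pre_pariUguali; infer_instance

def pvWitness_pariUguali : List Int × List Int := ([2, 3, 4], [4, 6])

def Spec_pariUguali (a : List Int) (b : List Int) (out : List Int) : Prop := out = pariUguali_alt a b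
instance (a : List Int) (b : List Int) (out : List Int) : Decidable (Spec_pariUguali a b out) := by
  unfold Spec_pariUguali; infer_instance

-- ===== CLAIM (what is proved, stated in full; the proofs are below) =====
def Claim_equal_pariUguali : Prop :=
  ∀ (a : List Int) (b : List Int), Dom_pariUguali a b → Pre_pariUguali a b →
    Spec_pariUguali a b (pariUguali a b)

-- ===== LEMMAS AND PROOFS =====

-- the elementwise 0/1 function both programs compute
def pvG (x y : Int) : Int := if x % 2 == 0 && y % 2 == 0 then 1 else 0

lemma pvG_comm (x y : Int) : pvG x y = pvG y x := by
  simp [pvG, Bool.and_comm]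

lemma listaPositiva_eq_true_iff (l : List Int) : listaPositiva l = true ↔ ∀ x ∈ l, 0 ≤ x := by
  induction l with
  | nil => simp [listaPositiva]
  | cons h t ih =>
    simp only [listaPositiva, List.mem_cons]
    constructor
    · intro hx
      by_cases hh : h < 0
      · simp [hh] at hx
      · intro x hx'
        rcases hx' with rfl | hx'
        · omega
        · exact (ih.mp (by simpa [hh] using hx)) x hx'
    · intro hx
      have hh : ¬ h < 0 := by have := hx h (Or.inl rfl); omega
      simpa [hh] using ih.mpr (fun x hx' => hx x (Or.inr hx'))

-- B's map over zipLongest1: common part is the zip, the padded tail is all zeros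
lemma map_zipLongest1 (a b : List Int) :
    (zipLongest1 a b).map (fun xy => pvG xy.1 xy.2) =
      (a.zip b).map (fun xy => pvG xy.1 xy.2) ++
        List.replicate (max a.length b.length - min a.length b.length) 0 := by
  induction a generalizing b with
  | nil =>
    induction b with
    | nil => simp [zipLongest1]
    | cons y ys ihb =>
      simp only [zipLongest1, List.map_cons, ihb]
      simp [pvG, List.replicate_succ]
  | cons x xs ih =>
    cases b with
    | nil =>
      simp only [zipLongest1, List.map_cons, ih []]
      simp [pvG, List.replicate_succ]
    | cons y ys =>
      simp only [zipLongest1, List.map_cons, ih ys, List.zip_cons_cons, List.length_cons]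
      have hcnt : max (xs.length + 1) (ys.length + 1) - min (xs.length + 1) (ys.length + 1)
          = max xs.length ys.length - min xs.length ys.length := by omega
      rw [hcnt]
      simp

-- A's while loop builds c ++ map pvG over the zip of the remaining suffixes
lemma whileLoop_eq (s l : List Int) (hsl : s.length ≤ l.length) :
    ∀ index c, pariUguali.whileLoop s l index c =
      c ++ ((s.drop index).zip (l.drop index)).map (fun xy => pvG xy.1 xy.2) := by
  intro index
  induction hfuel : s.length - index using Nat.strong_induction_on generalizing index with
  | _ n ih =>
    intro c
    rw [pariUguali.whileLoop]
    by_cases h : index < s.length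
    · have hl : index < l.length := lt_of_lt_of_le h hsl
      have h1 : s.drop index = s[index] :: s.drop (index + 1) := List.drop_eq_getElem_cons h
      have h2 : l.drop index = l[index] :: l.drop (index + 1) := List.drop_eq_getElem_cons hl
      have hget_s : PySem.List.pyGetD s (index : Int) 0 = s[index] := by
        simp [PySem.List.pyGetD_natCast, List.getD_eq_getElem?_getD, h]
      have hget_l : PySem.List.pyGetD l (index : Int) 0 = l[index] := by
        simp [PySem.List.pyGetD_natCast, List.getD_eq_getElem?_getD, hl]
      have hrec := ih (s.length - (index + 1)) (by omega) (index + 1) rfl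
        (c ++ [if PySem.List.pyGetD s (index : Int) 0 % 2 == 0 &&
               PySem.List.pyGetD l (index : Int) 0 % 2 == 0 then (1 : Int) else 0])
      simp only [h, dif_pos]
      rw [hrec, List.append_assoc]
      congr 1
      rw [h1, h2, List.zip_cons_cons, List.map_cons, List.singleton_append]
      congr 1
      simp [pvG, hget_s, hget_l]
    · simp only [h, dif_neg, not_false_iff]
      rw [List.drop_eq_nil_of_le (by omega : s.length ≤ index)]
      simp

-- the padding loop appends (length of the range) zeros
lemma foldl_pad (xs : List Int) : ∀ c : List Int,
    xs.foldl (fun c _ => c ++ [(0 : Int)]) c = c ++ List.replicate xs.length 0 := by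
  induction xs with
  | nil => simp
  | cons h t ih =>
    intro c
    simp [List.foldl_cons, ih, List.replicate_succ]

-- the symmetric zip: mapping a commutative function over the swapped zip
lemma map_zip_comm (a b : List Int) :
    ((b.zip a).map fun xy => pvG xy.1 xy.2) = (a.zip b).map (fun xy => pvG xy.1 xy.2) := by
  rw [← List.zip_swap a b, List.map_map]
  congr 1
  funext xy
  exact pvG_comm xy.2 xy.1

-- ===== VERDICT (by name: the statement is the Claim_ definition above) =====
theorem pariUguali_spec : Claim_equal_pariUguali := by
  intro a b _ hpre
  obtain ⟨ha, hb⟩ := hpre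
  unfold Spec_pariUguali pariUguali pariUguali_alt
  have hla : listaPositiva a = true := (listaPositiva_eq_true_iff a).mpr ha
  have hlb : listaPositiva b = true := (listaPositiva_eq_true_iff b).mpr hb
  have hany : (a.any (fun x => x < 0) || b.any (fun x => x < 0)) = false := by
    simp only [Bool.or_eq_false_iff, List.any_eq_false]
    exact ⟨fun x hx => by simpa using ha x hx, fun x hx => by simpa using hb x hx⟩
  rw [hla, hlb, hany]
  simp only [Bool.and_self, Bool.not_true, Bool.false_eq_true, if_false]
  have hlam : (fun xy : Int × Int => if xy.1 % 2 == 0 && xy.2 % 2 == 0 then (1 : Int) else 0)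
      = fun xy : Int × Int => pvG xy.1 xy.2 := rfl
  rw [hlam, map_zipLongest1]
  by_cases hab : a.length ≥ b.length
  · rw [if_pos hab, if_pos hab]
    rw [whileLoop_eq b a hab 0 []]
    simp only [List.drop_zero, List.nil_append]
    rw [foldl_pad, map_zip_comm]
    congr 1
    rw [PySem.List.length_pyRange_one]
    congr 1
    omega
  · rw [if_neg hab, if_neg hab]
    rw [whileLoop_eq a b (by omega) 0 []]
    simp only [List.drop_zero, List.nil_append]
    rw [foldl_pad]
    congr 1
    rw [PySem.List.length_pyRange_one]
    congr 1
    omega
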